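-- pv_equiv track=rewrite | github.com/tejaspythonwork/Python | GKS/set/9.py | def9
-- ===== SOURCE A (Python) =====
-- def def9(str):
--     present_vowels = []
--     absent_vowels = []
--     vowels = 'aeiouAEIOU'
--     count = 0
--
--     for char in str:
--      if char in vowels:
--          count = count + 1
--          if char not in present_vowels:
--              present_vowels.append(char)
--
--     for vowel in vowels:
--         if vowel not in present_vowels:
--             absent_vowels.append(vowel)
--
--     return count,present_vowels,absent_vowels
-- ===== SOURCE B (Python) =====
-- def def9(str):
--     vowels = 'aeiouAEIOU'
--     cnt = {}
--     for ch in str: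
--         cnt[ch] = cnt.get(ch, 0) + 1
--     count = sum(cnt.get(v, 0) for v in vowels)
--     present_vowels = [c for c in cnt if c in vowels]
--     absent_vowels = [v for v in vowels if v not in cnt]
--     return count, present_vowels, absent_vowels
-- ===== Notes on version B (the rewrite author's own statement) =====
-- stated objective: alternative
-- what changed: B builds a full character-frequency dict in one pass and derives the count (sum of vowel frequencies), present vowels (dict keys filtered to vowels, first-insertion order) and absent vowels (vowels missing from the dict) from that table, instead of A's per-character vowel test with a membership-scanned presence list.
import Mathlib
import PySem

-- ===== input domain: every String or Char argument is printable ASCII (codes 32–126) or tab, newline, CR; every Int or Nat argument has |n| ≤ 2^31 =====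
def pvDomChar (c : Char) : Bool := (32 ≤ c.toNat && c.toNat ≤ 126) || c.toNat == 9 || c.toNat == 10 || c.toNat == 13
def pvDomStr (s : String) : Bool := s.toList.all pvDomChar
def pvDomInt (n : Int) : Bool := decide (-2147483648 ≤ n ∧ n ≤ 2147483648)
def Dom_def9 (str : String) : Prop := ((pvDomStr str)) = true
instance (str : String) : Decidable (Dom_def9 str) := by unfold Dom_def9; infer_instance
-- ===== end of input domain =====

-- B replaces A's per-character vowel test (with a linear membership scan of the presence list)
-- by one character-frequency dict built in a single pass, from which count, present and absent
-- vowels are derived afterwards (alternative decomposition, same observable result).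

-- ===== PORT A =====
-- single-character Python strings are carried as Char during the loops and wrapped at the return
def def9 (str : String) : Int × List String × List String :=
  let vowels : List Char := "aeiouAEIOU".toList
  let st :=
    str.toList.foldl
      (fun (st : Int × List Char) char =>
        if vowels.contains char then
          if st.2.contains char then (st.1 + 1, st.2) else (st.1 + 1, st.2 ++ [char])
        else st)
      (0, [])
  let absent :=
    vowels.foldl (fun acc vowel => if st.2.contains vowel then acc else acc ++ [vowel]) []
  (st.1, st.2.map (fun c => String.ofList [c]), absent.map (fun c => String.ofList [c]))

-- ===== PORT B =====
def def9_alt (str : String) : Int × List String × List String :=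
  let vowels : List Char := "aeiouAEIOU".toList
  let cnt : PySem.Dict Char Int :=
    str.toList.foldl (fun d ch => d.insert ch (d.getD ch 0 + 1)) PySem.Dict.empty
  let count := vowels.foldl (fun acc v => acc + cnt.getD v 0) 0
  let present := cnt.keys.filter (fun c => vowels.contains c)
  let absent := vowels.filter (fun v => !cnt.contains v)
  (count, present.map (fun c => String.ofList [c]), absent.map (fun c => String.ofList [c]))

-- ===== PRECONDITION & SPEC =====
def Spec_def9 (str : String) (out : Int × List String × List String) : Prop := out = def9_alt str
instance (str : String) (out : Int × List String × List String) : Decidable (Spec_def9 str out) := by unfold Spec_def9; infer_instance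

-- ===== CLAIM (what is proved, stated in full; the proofs are below) =====
def Claim_equal_def9 : Prop := ∀ (str : String), Dom_def9 str → Spec_def9 str (def9 str)

-- ===== LEMMAS AND PROOFS =====

-- two disjoint Bool predicates: countP of their disjunction adds up
lemma pv_countP_disj (p q : Char → Bool) (l : List Char) (h : ∀ c, p c = true → q c = false) :
    l.countP (fun c => p c || q c) = l.countP p + l.countP q := by
  induction l with
  | nil => simp
  | cons c t ih =>
    by_cases hp : p c
    · simp [hp, h c hp, ih]
      omega
    · by_cases hq : q c <;> simp [hp, hq, ih] <;> omega

-- summing the multiplicities of the distinct elements of V equals counting members of V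
lemma pv_sum_counts (V : List Char) (hnd : V.Nodup) (l : List Char) :
    (V.map (fun v => ((l.count v : Nat) : Int))).sum
      = ((l.countP (fun c => V.contains c) : Nat) : Int) := by
  induction V with
  | nil => simp
  | cons v V' ih =>
    have hv : v ∉ V' := (List.nodup_cons.mp hnd).1
    have ih' := ih (List.nodup_cons.mp hnd).2
    have hdisj : ∀ c, (c == v) = true → V'.contains c = false := by
      intro c hc
      have hc' : c = v := by simpa using hc
      subst hc'
      simpa using hv
    have hcont : l.countP (fun c => (v :: V').contains c)
        = l.countP (fun c => (c == v) || V'.contains c) := by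
      apply List.countP_congr
      intro c _
      simp
    have hcnt : l.countP (fun c => c == v) = l.count v := by
      simp [List.count]
    rw [List.map_cons, List.sum_cons, ih', hcont, pv_countP_disj _ _ _ hdisj, hcnt]
    push_cast
    ring

-- Set.add commutes with filter
lemma pv_add_filter (p : Char → Bool) (s : List Char) (c : Char) :
    (PySem.Set.add s c).filter p
      = if p c then PySem.Set.add (s.filter p) c else s.filter p := by
  by_cases hs : c ∈ s <;> by_cases hp : p c <;>
    simp [PySem.Set.add, hs, hp, List.mem_filter]

lemma pv_foldl_add_filter (p : Char → Bool) (l : List Char) :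
    ∀ s : List Char,
      (l.foldl PySem.Set.add s).filter p = (l.filter p).foldl PySem.Set.add (s.filter p) := by
  induction l with
  | nil => intro s; simp
  | cons c t ih =>
    intro s
    rw [List.foldl_cons, ih, pv_add_filter]
    by_cases hp : p c <;> simp [hp]

-- building the set first and filtering afterwards = filtering first and building the set
lemma pv_ofList_filter (p : Char → Bool) (l : List Char) :
    (PySem.Set.ofList l).filter p = PySem.Set.ofList (l.filter p) := by
  have h := pv_foldl_add_filter p l []
  simpa [PySem.Set.ofList_eq_foldl] using h

lemma pv_def9_eq (str : String) : def9 str = def9_alt str := by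
  have hV : ("aeiouAEIOU".toList).Nodup := by decide
  simp only [def9, def9_alt]
  -- split A's pair loop into two independent accumulators
  have hsplit : (fun (st : Int × List Char) char =>
        if ("aeiouAEIOU".toList).contains char then
          if st.2.contains char then (st.1 + 1, st.2) else (st.1 + 1, st.2 ++ [char])
        else st)
      = (fun (st : Int × List Char) char =>
          (if ("aeiouAEIOU".toList).contains char then st.1 + 1 else st.1,
           if ("aeiouAEIOU".toList).contains char then PySem.Set.add st.2 char else st.2)) := by
    funext st c
    simp only [PySem.Set.add, PySem.Set.contains]
    split_ifs <;> rfl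
  rw [hsplit,
      PySem.List.foldl_prod_mk
        (f := fun (cnt : Int) c => if ("aeiouAEIOU".toList).contains c then cnt + 1 else cnt)
        (g := fun (pres : List Char) c => if ("aeiouAEIOU".toList).contains c then PySem.Set.add pres c else pres)]
  rw [PySem.List.foldl_if_add_one,
      PySem.List.foldl_if_eq_foldl_filter (f := PySem.Set.add),
      PySem.Dict.foldl_insert_getD_add_one_eq_counter,
      PySem.List.foldl_add (g := fun v => (PySem.Dict.counter str.toList).getD v 0)]
  simp only [PySem.Dict.keys_counter]
  -- the deduplicated presence list: filter-then-dedup = dedup-then-filter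
  have hpres : (str.toList.filter (fun c => ("aeiouAEIOU".toList).contains c)).foldl PySem.Set.add []
      = (PySem.Set.ofList str.toList).filter (fun c => ("aeiouAEIOU".toList).contains c) := by
    rw [pv_ofList_filter, PySem.Set.ofList_eq_foldl]
  rw [hpres]
  -- the vowel count: sum of per-vowel multiplicities = one countP pass
  have hcount : (0 : Int) + (("aeiouAEIOU".toList).map (fun v => (PySem.Dict.counter str.toList).getD v 0)).sum
      = (0 : Int) + ((str.toList.countP (fun c => ("aeiouAEIOU".toList).contains c) : Nat) : Int) := by
    rw [← pv_sum_counts _ hV]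
    apply congrArg
    apply congrArg
    apply List.map_congr_left
    intro v _
    rw [PySem.Dict.getD_counter]
  rw [hcount]
  -- the absent loop: swap the if-branches into filter shape
  have habs : (fun (acc : List Char) vowel =>
        if ((PySem.Set.ofList str.toList).filter (fun c => ("aeiouAEIOU".toList).contains c)).contains vowel then acc
        else acc ++ [vowel])
      = (fun (acc : List Char) vowel =>
          if (!((PySem.Set.ofList str.toList).filter (fun c => ("aeiouAEIOU".toList).contains c)).contains vowel) then acc ++ [vowel]
          else acc) := by
    funext acc v
    cases ((PySem.Set.ofList str.toList).filter (fun c => ("aeiouAEIOU".toList).contains c)).contains v <;>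
      simp
  rw [habs, PySem.List.foldl_append_if_eq_filter]
  -- the two absent filters test the same condition on every vowel
  have habs2 : (("aeiouAEIOU".toList).filter
        (fun v => !((PySem.Set.ofList str.toList).filter (fun c => ("aeiouAEIOU".toList).contains c)).contains v))
      = (("aeiouAEIOU".toList).filter (fun v => !(PySem.Dict.counter str.toList).contains v)) := by
    apply List.filter_congr
    intro v hv
    have hvv : ("aeiouAEIOU".toList).contains v = true := by simpa using hv
    have hc : ((PySem.Set.ofList str.toList).filter (fun c => ("aeiouAEIOU".toList).contains c)).contains v
        = (PySem.Dict.counter str.toList).contains v := by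
      rw [PySem.Dict.contains_counter, Bool.eq_iff_iff]
      simp [List.mem_filter, PySem.Set.mem_ofList]
      intro _
      simpa using hv
    rw [hc]
  rw [habs2]
  simp only [List.nil_append]

-- ===== VERDICT (by name: the statement is the Claim_ definition above) =====
theorem def9_spec : Claim_equal_def9 := by
  intro str _
  unfold Spec_def9
  exact pv_def9_eq str
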